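-- pv_equiv track=rewrite | github.com/lawrencegranda/bionb3500-final-project | src/embeddings.py | _find_lemma_token_index
-- ===== SOURCE A (Python) =====
-- from typing import Optional
--
-- def _find_lemma_token_index(tokens: list[str], lemma: str) -> Optional[int]:
--     """
--     Find the index of the lemma token in the tokenized sentence.
--
--     Args:
--         tokens: List of tokens from the tokenizer.
--         lemma: Target lemma to find.
--
--     Returns:
--         Index of the lemma token, or None if not found.
--     """
--     # Try to find exact match first
--     lemma_lower = lemma.lower()
--     for i, token in enumerate(tokens):
--         if token == lemma_lower:
--             return i
--
--     # Try to find partial match (for subword tokens)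
--     for i, token in enumerate(tokens):
--         if token.startswith("##"):
--             continue
--         if lemma_lower.startswith(token):
--             return i
--
--     return None
-- ===== SOURCE B (Python) =====
-- from typing import Optional
--
-- def _find_lemma_token_index(tokens: list[str], lemma: str) -> Optional[int]:
--     lemma_lower = lemma.lower()
--     prefix_idx = None
--     for i, token in enumerate(tokens):
--         if token == lemma_lower:
--             return i
--         if prefix_idx is None and not token.startswith("##") and lemma_lower.startswith(token):
--             prefix_idx = i
--     return prefix_idx
-- ===== Notes on version B (the rewrite author's own statement) =====
-- stated objective: alternative
-- what changed: Replaced A's two sequential scans (exact-match pass, then prefix-match pass) with a single pass over enumerate(tokens) that returns immediately on an exact match and defers the first eligible prefix match in one variable, preserving exact-match global priority.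
import Mathlib
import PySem

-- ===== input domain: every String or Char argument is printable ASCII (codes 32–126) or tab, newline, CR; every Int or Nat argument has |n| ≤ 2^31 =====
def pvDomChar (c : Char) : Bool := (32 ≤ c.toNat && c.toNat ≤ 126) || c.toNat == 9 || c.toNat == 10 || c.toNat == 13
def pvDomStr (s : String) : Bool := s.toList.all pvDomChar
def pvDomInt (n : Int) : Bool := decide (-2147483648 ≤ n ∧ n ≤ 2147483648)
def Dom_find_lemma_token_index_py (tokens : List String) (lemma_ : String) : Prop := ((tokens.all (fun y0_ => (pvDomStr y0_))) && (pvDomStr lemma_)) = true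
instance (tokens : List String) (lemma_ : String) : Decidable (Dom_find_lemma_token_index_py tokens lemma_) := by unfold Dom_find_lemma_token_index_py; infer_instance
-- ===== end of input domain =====

-- B replaces A's two sequential scans with one pass that returns on an exact match and
-- defers the first eligible prefix match; same results, alternative decomposition.

-- ===== PORT A =====
-- A's first loop: return index of first token equal to lemma_lower
def pvFindExact (ll : String) : List String → Int → Option Int
  | [], _ => none
  | t :: ts, i => if t = ll then some i else pvFindExact ll ts (i + 1)

-- A's second loop: skip '##'-tokens, return first i with lemma_lower.startswith(token)
def pvFindPrefix (ll : String) : List String → Int → Option Int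
  | [], _ => none
  | t :: ts, i =>
    if PySem.Str.startswith t "##" then pvFindPrefix ll ts (i + 1)
    else if PySem.Str.startswith ll t then some i
    else pvFindPrefix ll ts (i + 1)

def find_lemma_token_index_py (tokens : List String) (lemma_ : String) : Option Int :=
  let ll := PySem.Str.lower lemma_
  match pvFindExact ll tokens 0 with
  | some i => some i
  | none => pvFindPrefix ll tokens 0

-- ===== PORT B =====
-- B's single loop with the deferred prefix candidate carried as `acc`
def pvScan (ll : String) : List String → Int → Option Int → Option Int
  | [], _, acc => acc
  | t :: ts, i, acc =>
    if t = ll then some i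
    else
      let acc' := if acc = none ∧ ¬ PySem.Str.startswith t "##" ∧ PySem.Str.startswith ll t
                  then some i else acc
      pvScan ll ts (i + 1) acc'

def find_lemma_token_index_py_alt (tokens : List String) (lemma_ : String) : Option Int :=
  pvScan (PySem.Str.lower lemma_) tokens 0 none

-- ===== PRECONDITION & SPEC =====
def Spec_find_lemma_token_index_py (tokens : List String) (lemma_ : String) (out : Option Int) : Prop := out = find_lemma_token_index_py_alt tokens lemma_
instance (tokens : List String) (lemma_ : String) (out : Option Int) : Decidable (Spec_find_lemma_token_index_py tokens lemma_ out) := by unfold Spec_find_lemma_token_index_py; infer_instance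

-- ===== CLAIM (what is proved, stated in full; the proofs are below) =====
def Claim_equal_find_lemma_token_index_py : Prop := ∀ (tokens : List String) (lemma_ : String), Dom_find_lemma_token_index_py tokens lemma_ → Spec_find_lemma_token_index_py tokens lemma_ (find_lemma_token_index_py tokens lemma_)

-- ===== LEMMAS AND PROOFS =====
-- The single pass equals: exact search first; if it fails, the carried candidate, else the prefix search.
theorem pvScan_eq (ll : String) (ts : List String) (i : Int) (acc : Option Int) :
    pvScan ll ts i acc =
      match pvFindExact ll ts i with
      | some j => some j
      | none => match acc with
                | some p => some p
                | none => pvFindPrefix ll ts i := by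
  induction ts generalizing i acc with
  | nil => cases acc <;> simp [pvScan, pvFindExact, pvFindPrefix]
  | cons t ts ih =>
    by_cases he : t = ll
    · simp [pvScan, pvFindExact, he]
    · simp only [pvScan, pvFindExact, if_neg he]
      rw [ih]
      cases acc with
      | some p => simp
      | none =>
        by_cases h1 : PySem.Str.startswith t "##" <;>
          by_cases h2 : PySem.Str.startswith ll t <;>
            simp [PySem.Str.startswith] at h1 h2 <;>
              simp [pvFindPrefix, PySem.Str.startswith, h1, h2]

-- ===== VERDICT (by name: the statement is the Claim_ definition above) =====
theorem find_lemma_token_index_py_spec : Claim_equal_find_lemma_token_index_py := by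
  intro tokens lemma_ _
  unfold Spec_find_lemma_token_index_py find_lemma_token_index_py find_lemma_token_index_py_alt
  rw [pvScan_eq]
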